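-- pv_equiv track=rewrite | github.com/bereziat/qcm | src/corriger.py | mise_ordre_squares
-- ===== SOURCE A (Python) =====
-- def mise_ordre_squares(squares):
--     squares_ordre =[]
--     for num in range(10):
--         squares_temp = squares[num*7:num*7+7]
--         for passnum in range(len(squares_temp) - 1, 0, -1):
--             # print alist,passnum
--             for i in range(passnum):
--                 if squares_temp[i][0][0] > squares_temp[i + 1][0][0]:
--                     temp = squares_temp[i]
--                     squares_temp[i] = squares_temp[i + 1]
--                     squares_temp[i + 1] = temp
--         squares_ordre += squares_temp
--     return squares_ordre
-- ===== SOURCE B (Python) =====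
-- def mise_ordre_squares(squares):
--     squares_ordre = []
--     for num in range(10):
--         squares_ordre += sorted(squares[num*7:num*7+7], key=lambda s: s[0][0])
--     return squares_ordre
-- ===== Notes on version B (the rewrite author's own statement) =====
-- stated objective: simpler
-- what changed: the hand-written bubble sort of each 7-element chunk (nested passnum/i index loops with a manual swap) is replaced by one stable sorted(chunk, key=lambda s: s[0][0]) call per chunk; the chunking slice squares[num*7:num*7+7] is kept
-- outside the precondition, e.g. on mise_ordre_squares([[]]): A returns [[]], B raises IndexError
import Mathlib
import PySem

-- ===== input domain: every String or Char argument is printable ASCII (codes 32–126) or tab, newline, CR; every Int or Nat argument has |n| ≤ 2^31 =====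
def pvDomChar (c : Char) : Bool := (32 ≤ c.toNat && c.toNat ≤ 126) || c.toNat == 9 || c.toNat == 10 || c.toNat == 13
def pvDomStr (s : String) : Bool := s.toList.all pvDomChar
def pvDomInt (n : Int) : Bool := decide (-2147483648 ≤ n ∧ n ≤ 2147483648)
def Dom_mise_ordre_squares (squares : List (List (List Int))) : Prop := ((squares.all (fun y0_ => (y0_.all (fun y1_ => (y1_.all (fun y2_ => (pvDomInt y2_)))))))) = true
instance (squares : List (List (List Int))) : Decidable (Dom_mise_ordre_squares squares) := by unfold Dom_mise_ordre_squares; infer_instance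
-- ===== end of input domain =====

-- B replaces the hand-written bubble sort of each 7-element chunk by one stable
-- sorted(chunk, key=lambda s: s[0][0]) call per chunk (objective: simpler).


-- ===== PORT A =====
-- s[0][0], the comparison key both sources use; exact under Pre_ (s and s[0] nonempty there)
def pvKey (s : List (List Int)) : Int := (s.getD 0 []).getD 0 0

-- one body of the inner loop: compare squares_temp[i][0][0] with squares_temp[i+1][0][0], swap in place
def pvStep (l : List (List (List Int))) (i : Nat) : List (List (List Int)) :=
  if pvKey (l.getD (i + 1) []) < pvKey (l.getD i []) then
    let temp := l.getD i []
    (l.set i (l.getD (i + 1) [])).set (i + 1) temp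
  else l

-- 'for i in range(passnum)'
def pvPass (l : List (List (List Int))) (passnum : Nat) : List (List (List Int)) :=
  (List.range passnum).foldl pvStep l

-- 'for passnum in range(len(squares_temp)-1, 0, -1)' : passnums len-1, len-2, …, 1
def pvBubble (l : List (List (List Int))) : List (List (List Int)) :=
  ((List.range' 1 (l.length - 1)).reverse).foldl pvPass l

def mise_ordre_squares (squares : List (List (List Int))) : List (List (List Int)) :=
  (List.range 10).foldl
    (fun acc num =>
      acc ++ pvBubble (PySem.List.slice squares (some ((num : Int) * 7)) (some ((num : Int) * 7 + 7))))
    []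

-- ===== PORT B =====
def mise_ordre_squares_alt (squares : List (List (List Int))) : List (List (List Int)) :=
  (List.range 10).foldl
    (fun acc num =>
      acc ++ PySem.List.sorted (PySem.List.slice squares (some ((num : Int) * 7)) (some ((num : Int) * 7 + 7))) pvKey false)
    []

-- ===== PRECONDITION & SPEC =====
-- Pre_ excludes inputs whose first 70 elements contain an element without a first coordinate
-- (no rows, or an empty first row): on those A raises IndexError in a comparison, except when such
-- an element sits alone in its chunk, where A returns the chunk untouched while B's sorted() key
-- evaluation raises (see the cite in claim.json).
def Pre_mise_ordre_squares (squares : List (List (List Int))) : Prop :=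
  ∀ s ∈ squares.take 70, s ≠ [] ∧ s.getD 0 [] ≠ []
instance (squares : List (List (List Int))) : Decidable (Pre_mise_ordre_squares squares) := by
  unfold Pre_mise_ordre_squares; infer_instance

def pvWitness_mise_ordre_squares : List (List (List Int)) := [[[3]], [[1]], [[2]]]

def Spec_mise_ordre_squares (squares : List (List (List Int))) (out : List (List (List Int))) : Prop := out = mise_ordre_squares_alt squares
instance (squares : List (List (List Int))) (out : List (List (List Int))) : Decidable (Spec_mise_ordre_squares squares out) := by unfold Spec_mise_ordre_squares; infer_instance

-- ===== CLAIM (what is proved, stated in full; the proofs are below) =====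
def Claim_equal_mise_ordre_squares : Prop := ∀ (squares : List (List (List Int))), Dom_mise_ordre_squares squares → Pre_mise_ordre_squares squares → Spec_mise_ordre_squares squares (mise_ordre_squares squares)

-- ===== LEMMAS AND PROOFS =====

-- structural form of one bubble pass: carry the running (last) maximum rightward
def pvBp : List (List (List Int)) → List (List (List Int))
  | [] => []
  | [a] => [a]
  | a :: b :: t => if pvKey b < pvKey a then b :: pvBp (a :: t) else a :: pvBp (b :: t)

theorem pvBp_length (l : List (List (List Int))) : (pvBp l).length = l.length := by
  induction l using pvBp.induct with
  | case1 => simp [pvBp]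
  | case2 a => simp [pvBp]
  | case3 a b t hc ih => rw [pvBp, if_pos hc]; simpa using ih
  | case4 a b t hc ih => rw [pvBp, if_neg hc]; simpa using ih

theorem pvBp_mem {y : List (List Int)} {l : List (List (List Int))} (h : y ∈ pvBp l) : y ∈ l := by
  induction l using pvBp.induct with
  | case1 => simpa [pvBp] using h
  | case2 a => simpa [pvBp] using h
  | case3 a b t hc ih =>
      rw [pvBp, if_pos hc] at h
      rcases List.mem_cons.mp h with h | h
      · simp [h]
      · rcases List.mem_cons.mp (ih h) with h | h <;> simp [h]
  | case4 a b t hc ih =>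
      rw [pvBp, if_neg hc] at h
      rcases List.mem_cons.mp h with h | h
      · simp [h]
      · rcases List.mem_cons.mp (ih h) with h | h <;> simp [h]

theorem pvBp_ne_nil {l : List (List (List Int))} (h : l ≠ []) : pvBp l ≠ [] := by
  intro hn
  have hl := pvBp_length l
  rw [hn] at hl
  exact h (List.eq_nil_of_length_eq_zero hl.symm)

theorem pvBp_snoc (xs : List (List (List Int))) (x : List (List Int)) (h : xs ≠ []) :
    pvBp (xs ++ [x]) =
      (pvBp xs).dropLast ++
        (if pvKey x < pvKey ((pvBp xs).getLastD []) then [x, (pvBp xs).getLastD []]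
         else [(pvBp xs).getLastD [], x]) := by
  induction xs using pvBp.induct with
  | case1 => exact absurd rfl h
  | case2 a => simp [pvBp]
  | case3 a b t hc ih =>
      have hne : (a :: t) ≠ [] := by simp
      rw [List.cons_append, List.cons_append, pvBp, if_pos hc, pvBp, if_pos hc,
          show a :: (t ++ [x]) = (a :: t) ++ [x] by simp, ih hne]
      have h1 : pvBp (a :: t) ≠ [] := pvBp_ne_nil hne
      rcases List.eq_nil_or_concat (pvBp (a :: t)) with h2 | ⟨u, m, h2⟩
      · exact absurd h2 h1
      · have h2' : pvBp (a :: t) = u ++ [m] := by simpa using h2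
        have hd : (b :: (u ++ [m])).dropLast = b :: u := by
          rw [show b :: (u ++ [m]) = (b :: u) ++ [m] from rfl]
          simpa using List.dropLast_concat (l₁ := b :: u) (b := m)
        have hl : (b :: (u ++ [m])).getLastD [] = m := by
          rw [show b :: (u ++ [m]) = (b :: u) ++ [m] from rfl,
              List.getLastD_eq_getLast?, List.getLast?_concat (l := b :: u) (a := m)]
          rfl
        have hd2 : (u ++ [m]).dropLast = u := by simpa using List.dropLast_concat (l₁ := u) (b := m)
        have hl2 : (u ++ [m]).getLastD [] = m := by
          rw [List.getLastD_eq_getLast?, List.getLast?_concat (l := u) (a := m)]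
          rfl
        simp only [h2', hd, hl, hd2, hl2]
        simp
  | case4 a b t hc ih =>
      have hne : (b :: t) ≠ [] := by simp
      rw [List.cons_append, List.cons_append, pvBp, if_neg hc, pvBp, if_neg hc,
          show b :: (t ++ [x]) = (b :: t) ++ [x] by simp, ih hne]
      have h1 : pvBp (b :: t) ≠ [] := pvBp_ne_nil hne
      rcases List.eq_nil_or_concat (pvBp (b :: t)) with h2 | ⟨u, m, h2⟩
      · exact absurd h2 h1
      · have h2' : pvBp (b :: t) = u ++ [m] := by simpa using h2
        have hd : (a :: (u ++ [m])).dropLast = a :: u := by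
          rw [show a :: (u ++ [m]) = (a :: u) ++ [m] from rfl]
          simpa using List.dropLast_concat (l₁ := a :: u) (b := m)
        have hl : (a :: (u ++ [m])).getLastD [] = m := by
          rw [show a :: (u ++ [m]) = (a :: u) ++ [m] from rfl,
              List.getLastD_eq_getLast?, List.getLast?_concat (l := a :: u) (a := m)]
          rfl
        have hd2 : (u ++ [m]).dropLast = u := by simpa using List.dropLast_concat (l₁ := u) (b := m)
        have hl2 : (u ++ [m]).getLastD [] = m := by
          rw [List.getLastD_eq_getLast?, List.getLast?_concat (l := u) (a := m)]
          rfl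
        simp only [h2', hd, hl, hd2, hl2]
        simp


theorem pvStep_mid (u : List (List (List Int))) (m x : List (List Int)) (w : List (List (List Int))) :
    pvStep (u ++ m :: x :: w) u.length =
      u ++ (if pvKey x < pvKey m then x :: m :: w else m :: x :: w) := by
  induction u with
  | nil => simp [pvStep]
  | cons a u ih =>
      unfold pvStep at ih ⊢
      simp only [List.cons_append, List.length_cons, List.getD_cons_succ, List.set_cons_succ]
      by_cases hc : pvKey ((u ++ m :: x :: w).getD (u.length + 1) []) <
          pvKey ((u ++ m :: x :: w).getD u.length [])
      · rw [if_pos hc] at ih ⊢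
        rw [ih]
      · rw [if_neg hc] at ih ⊢
        rw [ih]

theorem pvStep_length (l : List (List (List Int))) (i : Nat) : (pvStep l i).length = l.length := by
  unfold pvStep; split <;> simp

theorem pvPass_length (l : List (List (List Int))) (p : Nat) : (pvPass l p).length = l.length := by
  unfold pvPass
  induction List.range p generalizing l with
  | nil => rfl
  | cons q qs ih => simp only [List.foldl_cons]; rw [ih, pvStep_length]

theorem pvPass_take (l : List (List (List Int))) (p : Nat) (hp : p < l.length) :
    pvPass l p = pvBp (l.take (p + 1)) ++ l.drop (p + 1) := by
  induction p with
  | zero =>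
      cases l with
      | nil => simp at hp
      | cons a t => simp [pvPass, pvBp]
  | succ p ih =>
      have hp' : p < l.length := Nat.lt_of_succ_lt hp
      have hstep : pvPass l (p + 1) = pvStep (pvPass l p) p := by
        unfold pvPass
        rw [List.range_succ, List.foldl_append]
        rfl
      rw [hstep, ih hp']
      -- name the pieces
      have hulen : (pvBp (l.take (p + 1))).length = p + 1 := by
        rw [pvBp_length, List.length_take]
        omega
      have hune : pvBp (l.take (p + 1)) ≠ [] := by
        intro hn; rw [hn] at hulen; simp at hulen
      have hgl : (pvBp (l.take (p + 1))).getLastD [] = (pvBp (l.take (p + 1))).getLast hune := by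
        rw [List.getLastD_eq_getLast?, List.getLast?_eq_some_getLast hune]
        rfl
      have hsplit : pvBp (l.take (p + 1)) =
          (pvBp (l.take (p + 1))).dropLast ++ [(pvBp (l.take (p + 1))).getLastD []] := by
        rw [hgl]
        exact (List.dropLast_append_getLast hune).symm
      have hdlen : ((pvBp (l.take (p + 1))).dropLast).length = p := by
        rw [List.length_dropLast, hulen]
        omega
      have hdrop : l.drop (p + 1) = l[p + 1] :: l.drop (p + 2) := by
        rw [List.drop_eq_getElem_cons hp]
      have htake : l.take (p + 2) = l.take (p + 1) ++ [l[p + 1]] := by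
        rw [List.take_succ]
        simp [List.getElem?_eq_getElem hp]
      have htne : l.take (p + 1) ≠ [] := by
        apply List.ne_nil_of_length_pos
        rw [List.length_take]
        omega
      calc pvStep (pvBp (l.take (p + 1)) ++ l.drop (p + 1)) p
          = pvStep ((pvBp (l.take (p + 1))).dropLast ++
              (pvBp (l.take (p + 1))).getLastD [] :: l[p + 1] :: l.drop (p + 2))
              ((pvBp (l.take (p + 1))).dropLast).length := by
            rw [hdlen]
            congr 1
            rw [hdrop]
            conv_lhs => rw [hsplit]
            simp
        _ = (pvBp (l.take (p + 1))).dropLast ++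
              (if pvKey l[p + 1] < pvKey ((pvBp (l.take (p + 1))).getLastD []) then
                l[p + 1] :: (pvBp (l.take (p + 1))).getLastD [] :: l.drop (p + 2)
              else (pvBp (l.take (p + 1))).getLastD [] :: l[p + 1] :: l.drop (p + 2)) := by
            rw [pvStep_mid]
        _ = pvBp (l.take (p + 1 + 1)) ++ l.drop (p + 1 + 1) := by
            rw [show p + 1 + 1 = p + 2 from rfl, htake, pvBp_snoc _ _ htne]
            split <;> simp

theorem pvPass_append (l r : List (List (List Int))) (p : Nat) (hp : p < l.length) :
    pvPass (l ++ r) p = pvPass l p ++ r := by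
  have hp2 : p < (l ++ r).length := by simp; omega
  rw [pvPass_take _ _ hp2, pvPass_take _ _ hp,
      List.take_append_of_le_length (by omega), List.drop_append_of_le_length (by omega)]
  simp

theorem foldl_pvPass_append (ps : List Nat) (l r : List (List (List Int)))
    (h : ∀ p ∈ ps, p < l.length) :
    ps.foldl pvPass (l ++ r) = ps.foldl pvPass l ++ r := by
  induction ps generalizing l with
  | nil => rfl
  | cons q qs ih =>
      simp only [List.foldl_cons]
      rw [pvPass_append _ _ _ (h q (by simp)), ih]
      intro p hm
      rw [pvPass_length]
      exact h p (by simp [hm])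

theorem insertBy_before_concat (before : List (List Int) → List (List Int) → Bool)
    (x m : List (List Int)) (zs : List (List (List Int))) (h : before x m = true) :
    PySem.List.insertBy before x (zs ++ [m]) = PySem.List.insertBy before x zs ++ [m] := by
  induction zs with
  | nil => simp [PySem.List.insertBy, h]
  | cons y ys ih =>
      simp only [List.cons_append, PySem.List.insertBy]
      split <;> simp [ih]

theorem sorted_snoc (xs : List (List (List Int))) (x : List (List Int)) :
    PySem.List.sorted (xs ++ [x]) pvKey =
      PySem.List.insertBy (fun a b => decide (pvKey a < pvKey b)) x (PySem.List.sorted xs pvKey) := by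
  rw [PySem.List.sorted_eq_foldl_insertBy, PySem.List.sorted_eq_foldl_insertBy, List.foldl_append]
  rfl

theorem sorted_decomp (xs : List (List (List Int))) (h : xs ≠ []) :
    PySem.List.sorted xs pvKey false =
      PySem.List.sorted ((pvBp xs).dropLast) pvKey false ++ [(pvBp xs).getLastD []] ∧
    ∀ y ∈ xs, pvKey y ≤ pvKey ((pvBp xs).getLastD []) := by
  induction xs using List.reverseRecOn with
  | nil => exact absurd rfl h
  | append_singleton xs x ih =>
      rcases List.eq_nil_or_concat xs with hx | ⟨w1, w2, hx⟩
      · subst hx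
        constructor
        · simp only [List.nil_append]
          rw [pvBp]
          rfl
        · intro y hy
          simp only [List.nil_append] at hy ⊢
          rw [pvBp]
          simp at hy
          simp [hy]
      · have hxs : xs ≠ [] := by rw [hx]; simp
        obtain ⟨hS, hM⟩ := ih hxs
        have hsnoc := pvBp_snoc xs x hxs
        by_cases hc : pvKey x < pvKey ((pvBp xs).getLastD [])
        · rw [if_pos hc] at hsnoc
          have hd : (pvBp (xs ++ [x])).dropLast = (pvBp xs).dropLast ++ [x] := by
            rw [hsnoc, show (pvBp xs).dropLast ++ [x, (pvBp xs).getLastD []]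
                  = ((pvBp xs).dropLast ++ [x]) ++ [(pvBp xs).getLastD []] by simp]
            simp
          have hg : (pvBp (xs ++ [x])).getLastD [] = (pvBp xs).getLastD [] := by
            rw [hsnoc, show (pvBp xs).dropLast ++ [x, (pvBp xs).getLastD []]
                  = ((pvBp xs).dropLast ++ [x]) ++ [(pvBp xs).getLastD []] by simp]
            rw [List.getLastD_eq_getLast?, List.getLast?_concat]
            rfl
          refine ⟨?_, ?_⟩
          · rw [hd, hg, sorted_snoc, sorted_snoc, hS,
                insertBy_before_concat _ _ _ _ (by simpa using hc)]
          · intro y hy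
            rw [hg]
            rcases List.mem_append.mp hy with hy | hy
            · exact hM y hy
            · simp at hy
              subst hy
              exact le_of_lt hc
        · rw [if_neg hc] at hsnoc
          have hd : (pvBp (xs ++ [x])).dropLast = (pvBp xs).dropLast ++ [(pvBp xs).getLastD []] := by
            rw [hsnoc, show (pvBp xs).dropLast ++ [(pvBp xs).getLastD [], x]
                  = ((pvBp xs).dropLast ++ [(pvBp xs).getLastD []]) ++ [x] by simp]
            simp
          have hg : (pvBp (xs ++ [x])).getLastD [] = x := by
            rw [hsnoc, show (pvBp xs).dropLast ++ [(pvBp xs).getLastD [], x]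
                  = ((pvBp xs).dropLast ++ [(pvBp xs).getLastD []]) ++ [x] by simp]
            rw [List.getLastD_eq_getLast?, List.getLast?_concat]
            rfl
          have hmle : ∀ y ∈ xs, pvKey y ≤ pvKey x := by
            intro y hy
            exact le_trans (hM y hy) (le_of_not_gt hc)
          have hdrople : ∀ y ∈ PySem.List.sorted ((pvBp xs).dropLast) pvKey false,
              pvKey y ≤ pvKey ((pvBp xs).getLastD []) := by
            intro y hy
            have hy2 : y ∈ (pvBp xs).dropLast := (PySem.List.mem_sorted _ _ _ _).mp hy
            have hy3 : y ∈ pvBp xs := List.dropLast_subset _ hy2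
            exact hM y (pvBp_mem hy3)
          have h1 : ∀ y ∈ PySem.List.sorted ((pvBp xs).dropLast) pvKey false ++ [(pvBp xs).getLastD []],
              (fun a b => decide (pvKey a < pvKey b)) x y = false := by
            intro y hy
            rcases List.mem_append.mp hy with hy | hy
            · have h2 := hdrople y hy
              simp only [decide_eq_false_iff_not, not_lt]
              omega
            · simp at hy
              subst hy
              simpa using le_of_not_gt hc
          have h2 : ∀ y ∈ PySem.List.sorted ((pvBp xs).dropLast) pvKey false,
              (fun a b => decide (pvKey a < pvKey b)) ((pvBp xs).getLastD []) y = false := by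
            intro y hy
            have h3 := hdrople y hy
            simp only [decide_eq_false_iff_not, not_lt]
            omega
          refine ⟨?_, ?_⟩
          · rw [hd, hg, sorted_snoc, sorted_snoc, hS,
                PySem.List.insertBy_of_forall_not_before _ _ _ h1,
                PySem.List.insertBy_of_forall_not_before _ _ _ h2]
          · intro y hy
            rw [hg]
            rcases List.mem_append.mp hy with hy | hy
            · exact hmle y hy
            · simp at hy
              subst hy
              exact le_refl _


theorem pvBp_split {l : List (List (List Int))} (h : l ≠ []) :
    pvBp l = (pvBp l).dropLast ++ [(pvBp l).getLastD []] := by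
  have hune : pvBp l ≠ [] := pvBp_ne_nil h
  rw [List.getLastD_eq_getLast?, List.getLast?_eq_some_getLast hune]
  exact (List.dropLast_append_getLast hune).symm

theorem pvBubble_eq_sorted_aux :
    ∀ n (l : List (List (List Int))), l.length = n →
      pvBubble l = PySem.List.sorted l pvKey false := by
  intro n
  induction n using Nat.strong_induction_on with
  | _ n ih =>
    intro l hl
    rcases n with _ | _ | n
    · have h0 : l = [] := List.eq_nil_of_length_eq_zero hl
      subst h0
      rfl
    · rcases l with _ | ⟨a, t⟩
      · simp at hl
      · rcases t with _ | ⟨b, t⟩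
        · rfl
        · simp at hl
    · have hne : l ≠ [] := by
        intro hn; rw [hn] at hl; simp at hl
      have hlen1 : l.length - 1 = n + 1 := by omega
      have hd : pvBubble l =
          ((List.range' 1 n).reverse).foldl pvPass (pvPass l (1 + n)) := by
        unfold pvBubble
        rw [hlen1, List.range'_concat, List.reverse_append]
        simp
      have hpass : pvPass l (1 + n) = pvBp l := by
        rw [pvPass_take _ _ (by omega)]
        rw [show 1 + n + 1 = n + 2 from by omega]
        rw [List.take_of_length_le (by omega), List.drop_eq_nil_of_le (by omega)]
        simp
      have hulen : ((pvBp l).dropLast).length = n + 1 := by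
        rw [List.length_dropLast, pvBp_length]
        omega
      obtain ⟨hS, _⟩ := sorted_decomp l hne
      rw [hd, hpass, pvBp_split hne,
          foldl_pvPass_append _ _ _ (by
            intro p hp
            rw [hulen]
            rw [List.mem_reverse, List.mem_range'_1] at hp
            omega)]
      have hbu : ((List.range' 1 n).reverse).foldl pvPass ((pvBp l).dropLast) =
          pvBubble ((pvBp l).dropLast) := by
        unfold pvBubble
        rw [hulen]
        simp
      rw [hbu, ih (n + 1) (by omega) _ hulen, hS]

theorem pvBubble_eq_sorted (l : List (List (List Int))) :
    pvBubble l = PySem.List.sorted l pvKey false := by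
  exact pvBubble_eq_sorted_aux l.length l rfl

-- ===== VERDICT (by name: the statement is the Claim_ definition above) =====
theorem mise_ordre_squares_spec : Claim_equal_mise_ordre_squares := by
  intro squares _ _
  unfold Spec_mise_ordre_squares mise_ordre_squares mise_ordre_squares_alt
  simp only [pvBubble_eq_sorted]
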